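-- pv_equiv track=rewrite | github.com/shamira-venturini/talkbank-morphosyntax-error-annotator | study_04_context_windows/scripts/prepare_enni_context_ablation_input.py | previous_same_speaker
-- ===== SOURCE A (Python) =====
-- from typing import Dict, Iterable, List, Optional, Tuple
--
-- def previous_same_speaker(
--     utterances: List[Dict],
--     target_index: int,
--     speaker: str,
-- ) -> Optional[Dict]:
--     for idx in range(target_index - 1, -1, -1):
--         if utterances[idx]["speaker"] == speaker:
--             return utterances[idx]
--     return None
-- ===== SOURCE B (Python) =====
-- def previous_same_speaker(utterances, target_index, speaker):
--     result = None
--     for idx in range(target_index):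
--         u = utterances[idx]
--         if u.get("speaker") == speaker:
--             result = u
--     return result
-- ===== Notes on version B (the rewrite author's own statement) =====
-- stated objective: alternative
-- what changed: Replaces A's backward early-exit scan with a forward sweep over range(target_index) that keeps overwriting a last-seen-match accumulator (using dict.get so keyless entries are skipped) and returns it after the loop; on inputs where A raises KeyError on a stranded keyless entry (outside Pre_), B returns a value instead.
import Mathlib
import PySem

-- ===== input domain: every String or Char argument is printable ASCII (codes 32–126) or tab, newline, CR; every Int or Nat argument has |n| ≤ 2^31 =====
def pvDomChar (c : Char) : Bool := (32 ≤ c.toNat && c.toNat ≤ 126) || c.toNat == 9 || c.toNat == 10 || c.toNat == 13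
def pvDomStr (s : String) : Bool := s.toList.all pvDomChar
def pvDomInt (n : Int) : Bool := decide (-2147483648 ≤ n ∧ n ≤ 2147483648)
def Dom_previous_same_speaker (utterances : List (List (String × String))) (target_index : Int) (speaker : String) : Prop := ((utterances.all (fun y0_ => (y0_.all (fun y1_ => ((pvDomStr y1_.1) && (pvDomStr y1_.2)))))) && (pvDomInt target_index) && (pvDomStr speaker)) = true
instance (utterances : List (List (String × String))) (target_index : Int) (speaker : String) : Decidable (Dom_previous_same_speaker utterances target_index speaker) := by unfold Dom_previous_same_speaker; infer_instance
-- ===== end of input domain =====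

-- B replaces A's backward early-exit scan with a forward sweep accumulating the last match via dict.get (alternative decomposition, same cost); Pre_ excludes exactly the inputs where A raises.


-- ===== PORT A =====
-- loop over idx = n-1, n-2, …, 0 (A's 'for idx in range(target_index-1, -1, -1)');
-- a failed index or missing "speaker" key is a raise in Python — excluded by Pre_, port returns none there
def pvAgo (utterances : List (List (String × String))) (speaker : String) : Nat → Option (List (String × String))
  | 0 => none
  | n + 1 =>
    match PySem.List.pyGet? utterances (n : Int) with
    | none => none
    | some u =>
      match List.lookup "speaker" u with
      | none => none
      | some s => if s = speaker then some u else pvAgo utterances speaker n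

def previous_same_speaker (utterances : List (List (String × String))) (target_index : Int) (speaker : String) : Option (List (String × String)) :=
  pvAgo utterances speaker target_index.toNat

-- ===== PORT B =====
-- forward sweep 'for idx in range(target_index)' overwriting result whenever u.get("speaker") == speaker
def previous_same_speaker_alt (utterances : List (List (String × String))) (target_index : Int) (speaker : String) : Option (List (String × String)) :=
  (List.range target_index.toNat).foldl
    (fun result (idx : Nat) =>
      match PySem.List.pyGet? utterances (idx : Int) with
      | none => result  -- IndexError in Python; excluded by Pre_
      | some u => if List.lookup "speaker" u = some speaker then some u else result)
    none

-- ===== PRECONDITION & SPEC =====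
-- Pre_ excludes exactly the inputs on which A raises: target_index beyond the list (IndexError) or a keyless
-- utterance reached by A's backward scan before any matching one (KeyError); on every input where A returns, Pre_ holds.
def Pre_previous_same_speaker (utterances : List (List (String × String))) (target_index : Int) (speaker : String) : Prop :=
  target_index ≤ (utterances.length : Int) ∧
  ∀ i < target_index.toNat, List.lookup "speaker" (utterances.getD i []) = none →
    ∃ j < target_index.toNat, i < j ∧ List.lookup "speaker" (utterances.getD j []) = some speaker
instance (utterances : List (List (String × String))) (target_index : Int) (speaker : String) : Decidable (Pre_previous_same_speaker utterances target_index speaker) := by unfold Pre_previous_same_speaker; infer_instance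

def pvWitness_previous_same_speaker : (List (List (String × String))) × Int × String :=
  ([[("speaker", "a")], [("speaker", "b")]], 2, "a")

def Spec_previous_same_speaker (utterances : List (List (String × String))) (target_index : Int) (speaker : String) (out : Option (List (String × String))) : Prop := out = previous_same_speaker_alt utterances target_index speaker
instance (utterances : List (List (String × String))) (target_index : Int) (speaker : String) (out : Option (List (String × String))) : Decidable (Spec_previous_same_speaker utterances target_index speaker out) := by unfold Spec_previous_same_speaker; infer_instance

-- ===== CLAIM (what is proved, stated in full; the proofs are below) =====
def Claim_equal_previous_same_speaker : Prop := ∀ (utterances : List (List (String × String))) (target_index : Int) (speaker : String), Dom_previous_same_speaker utterances target_index speaker → Pre_previous_same_speaker utterances target_index speaker → Spec_previous_same_speaker utterances target_index speaker (previous_same_speaker utterances target_index speaker)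

-- ===== LEMMAS AND PROOFS =====

-- key invariant: under Pre_'s no-stranded-keyless condition, the backward early-exit scan
-- equals the forward last-match fold
lemma pvAgo_eq_foldl (utterances : List (List (String × String))) (speaker : String) (n : Nat)
    (hn : n ≤ utterances.length)
    (hk : ∀ i < n, List.lookup "speaker" (utterances.getD i []) = none →
      ∃ j < n, i < j ∧ List.lookup "speaker" (utterances.getD j []) = some speaker) :
    pvAgo utterances speaker n = (List.range n).foldl
      (fun result (idx : Nat) =>
        match PySem.List.pyGet? utterances (idx : Int) with
        | none => result
        | some u => if List.lookup "speaker" u = some speaker then some u else result)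
      none := by
  induction n with
  | zero => simp [pvAgo]
  | succ m ih =>
    rw [List.range_succ, List.foldl_append]
    have hget : PySem.List.pyGet? utterances (m : Int) = some utterances[m] := by
      rw [PySem.List.pyGet?_natCast]; exact List.getElem?_eq_getElem (by omega)
    have hgetD : utterances.getD m [] = utterances[m] := List.getD_eq_getElem _ _ (by omega)
    simp only [List.foldl_cons, List.foldl_nil]
    rcases hs : List.lookup "speaker" utterances[m] with _ | s
    · -- A raises here: contradicts Pre_'s condition at index m
      obtain ⟨j, hjm, hij, _⟩ := hk m (by omega) (by rw [hgetD]; exact hs)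
      omega
    · by_cases hmatch : s = speaker
      · simp [pvAgo, hget, hs, hmatch]
      · have ihm : pvAgo utterances speaker m = _ := ih (by omega) (fun i hi hnone => by
          obtain ⟨j, hjm, hij, hv2⟩ := hk i (by omega) hnone
          refine ⟨j, ?_, hij, hv2⟩
          rcases Nat.lt_succ_iff_lt_or_eq.mp hjm with h | h
          · exact h
          · subst h
            rw [hgetD] at hv2
            exact absurd (Option.some.inj (hs.symm.trans hv2)) hmatch)
        simp [pvAgo, hget, hs, hmatch, ihm]

-- ===== VERDICT (by name: the statement is the Claim_ definition above) =====
theorem previous_same_speaker_spec : Claim_equal_previous_same_speaker := by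
  intro utterances target_index speaker _hdom hpre
  obtain ⟨hlen, hkeys⟩ := hpre
  show previous_same_speaker utterances target_index speaker
      = previous_same_speaker_alt utterances target_index speaker
  unfold previous_same_speaker previous_same_speaker_alt
  exact pvAgo_eq_foldl utterances speaker target_index.toNat (by omega) hkeys
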